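-- pv_equiv track=rewrite | github.com/avlakshmy/programming-practice | generateLetterCombos.py | generateLetterCombinations
-- ===== SOURCE A (Python) =====
-- def generateLetterCombinations(allPossibleCombinations):
--     if len(allPossibleCombinations) == 1:
--         return allPossibleCombinations[0]
--     firstLetters = allPossibleCombinations[0]
--     remainingLetterCombinations = generateLetterCombinations(allPossibleCombinations[1:])
--     answer = []
--     for letter in firstLetters:
--         answer.extend([letter + combination for combination in remainingLetterCombinations])
--     return answer
-- ===== SOURCE B (Python) =====
-- def generateLetterCombinations(allPossibleCombinations):
--     result = allPossibleCombinations[0]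
--     for group in allPossibleCombinations[1:]:
--         result = [prefix + letter for prefix in result for letter in group]
--     return result
-- ===== Notes on version B (the rewrite author's own statement) =====
-- stated objective: simpler
-- what changed: Replaces the right-to-left recursion (slice + recursive call + extend loop) with a single iterative left fold over the groups that rebuilds the prefix list at each step.
import Mathlib
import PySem

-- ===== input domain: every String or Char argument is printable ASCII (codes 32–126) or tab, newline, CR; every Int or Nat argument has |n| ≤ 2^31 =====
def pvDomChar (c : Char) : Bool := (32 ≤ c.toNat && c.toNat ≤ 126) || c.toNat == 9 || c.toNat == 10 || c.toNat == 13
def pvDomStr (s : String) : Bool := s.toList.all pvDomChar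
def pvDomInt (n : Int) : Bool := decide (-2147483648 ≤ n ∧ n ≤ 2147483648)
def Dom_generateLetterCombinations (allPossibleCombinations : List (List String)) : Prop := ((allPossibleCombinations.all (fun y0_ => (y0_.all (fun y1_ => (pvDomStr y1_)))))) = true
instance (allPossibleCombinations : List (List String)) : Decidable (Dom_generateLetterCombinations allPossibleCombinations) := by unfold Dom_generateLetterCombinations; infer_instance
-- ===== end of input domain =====

-- B replaces A's right-to-left recursion with a single iterative left fold over the groups (objective: simpler).
-- ===== PORT A =====
-- Port of A: recursion on the list; the [] case is unreachable under Pre_ (Python raises IndexError there).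
def generateLetterCombinations (allPossibleCombinations : List (List String)) : List String :=
  match allPossibleCombinations with
  | [] => []
  | [g] => g
  | g :: rest =>
      let remainingLetterCombinations := generateLetterCombinations rest
      g.foldl (fun answer letter =>
        answer ++ remainingLetterCombinations.map (fun combination => letter ++ combination)) []

-- ===== PORT B =====
-- Port of B: fold over the tail; the [] case is unreachable under Pre_ (Python raises IndexError there).
def generateLetterCombinations_alt (allPossibleCombinations : List (List String)) : List String :=
  match allPossibleCombinations with
  | [] => []
  | g :: rest =>
      rest.foldl (fun result group =>
        result.flatMap (fun pfx => group.map (fun letter => pfx ++ letter))) g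

-- ===== PRECONDITION & SPEC =====
-- Pre_ excludes only the empty list, on which Python A (and B) raise IndexError.
def Pre_generateLetterCombinations (allPossibleCombinations : List (List String)) : Prop :=
  allPossibleCombinations ≠ []
instance (allPossibleCombinations : List (List String)) : Decidable (Pre_generateLetterCombinations allPossibleCombinations) := by
  unfold Pre_generateLetterCombinations; infer_instance

def pvWitness_generateLetterCombinations : List (List String) := [["a", "b"], ["c"]]

def Spec_generateLetterCombinations (allPossibleCombinations : List (List String)) (out : List String) : Prop := out = generateLetterCombinations_alt allPossibleCombinations
instance (allPossibleCombinations : List (List String)) (out : List String) : Decidable (Spec_generateLetterCombinations allPossibleCombinations out) := by unfold Spec_generateLetterCombinations; infer_instance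

-- ===== CLAIM (what is proved, stated in full; the proofs are below) =====
def Claim_equal_generateLetterCombinations : Prop := ∀ (allPossibleCombinations : List (List String)), Dom_generateLetterCombinations allPossibleCombinations → Pre_generateLetterCombinations allPossibleCombinations → Spec_generateLetterCombinations allPossibleCombinations (generateLetterCombinations allPossibleCombinations)

-- ===== LEMMAS AND PROOFS =====

-- the step both programs take, written as B's fold step
def pvOp (x y : List String) : List String :=
  x.flatMap (fun p => y.map (fun l => p ++ l))

theorem pvOp_assoc (x y z : List String) : pvOp (pvOp x y) z = pvOp x (pvOp y z) := by
  simp only [pvOp, List.flatMap_assoc, List.flatMap_map, List.map_flatMap, List.map_map]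
  simp [Function.comp_def, String.append_assoc]

theorem foldl_pvOp_shift (t : List (List String)) (g h : List String) :
    t.foldl pvOp (pvOp g h) = pvOp g (t.foldl pvOp h) := by
  induction t generalizing h with
  | nil => rfl
  | cons x t ih => simp only [List.foldl_cons, pvOp_assoc, ih]

theorem genA_eq_foldl (rest : List (List String)) (g : List String) :
    generateLetterCombinations (g :: rest) = rest.foldl pvOp g := by
  induction rest generalizing g with
  | nil => rfl
  | cons h t ih =>
      show (let r := generateLetterCombinations (h :: t);
            g.foldl (fun answer letter => answer ++ r.map (fun c => letter ++ c)) []) = _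
      rw [PySem.List.foldl_append_eq_flatMap, ih h, List.foldl_cons, foldl_pvOp_shift]
      rfl

theorem alt_eq_foldl (g : List String) (rest : List (List String)) :
    generateLetterCombinations_alt (g :: rest) = rest.foldl pvOp g := by
  unfold generateLetterCombinations_alt pvOp
  rfl

-- ===== VERDICT (by name: the statement is the Claim_ definition above) =====
theorem generateLetterCombinations_spec : Claim_equal_generateLetterCombinations := by
  intro xs _ hpre
  match xs with
  | [] => exact absurd rfl hpre
  | g :: rest =>
      unfold Spec_generateLetterCombinations
      rw [genA_eq_foldl, alt_eq_foldl]
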